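-- pv_equiv track=rewrite | github.com/dromation/acnc | data/converter/converter.py | ladder_logic_to_hex
-- ===== SOURCE A (Python) =====
-- def ladder_logic_to_hex(ladder_logic):
--     hex_data = ''
--     lines = ladder_logic.split('\n')
--     for line in lines:
--         if line.startswith('LD '):
--             rung = line[3:]
--             hex_data += rung
--     return hex_data
-- ===== SOURCE B (Python) =====
-- import re
--
-- def ladder_logic_to_hex(ladder_logic):
--     # One multiline-anchored regex scan instead of split/loop/startswith.
--     return ''.join(re.findall(r'^LD (.*)', ladder_logic, flags=re.MULTILINE))
-- ===== Notes on version B (the rewrite author's own statement) =====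
-- stated objective: idiomatic
-- what changed: Replaces the explicit split-on-newline loop with startswith/slicing by a single multiline-anchored regex scan: re.findall(r'^LD (.*)', s, re.MULTILINE) joined together.
import Mathlib
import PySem

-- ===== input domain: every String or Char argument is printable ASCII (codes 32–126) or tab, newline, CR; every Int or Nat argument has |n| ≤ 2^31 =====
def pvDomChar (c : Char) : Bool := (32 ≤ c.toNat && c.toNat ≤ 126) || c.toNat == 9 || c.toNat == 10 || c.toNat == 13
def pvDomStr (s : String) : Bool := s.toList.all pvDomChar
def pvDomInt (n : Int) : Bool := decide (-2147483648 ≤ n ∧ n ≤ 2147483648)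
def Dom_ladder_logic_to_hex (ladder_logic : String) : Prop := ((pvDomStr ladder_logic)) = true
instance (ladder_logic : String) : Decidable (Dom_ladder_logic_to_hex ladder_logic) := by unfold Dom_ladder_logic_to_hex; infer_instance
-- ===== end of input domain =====

-- B replaces A's split-on-'\n' loop with a single anchored multiline regex scan
-- (ported as a direct character-level line scanner); objective: idiomatic, same cost.

-- ===== PORT A =====
-- split('\n') → PySem.Chars.splitOn, startswith → PySem.Chars.startswith, line[3:] → PySem.Chars.slice
def ladder_logic_to_hex (ladder_logic : String) : String :=
  let lines := PySem.Chars.splitOn ladder_logic.toList ['\n']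
  String.ofList <| lines.foldl (fun hex_data line =>
    if PySem.Chars.startswith line ['L', 'D', ' '] then
      hex_data ++ PySem.Chars.slice line (some 3) none
    else hex_data) []

-- ===== PORT B =====
-- Hand port of re.findall(r'^LD (.*)', s, re.MULTILINE): at each line start, if the
-- line begins 'LD ' capture the rest of the line ('.' stops at '\n'); exact for this pattern.

/-- Split off the current line: characters before the first '\n', and the remainder
after it (`none` when there is no '\n' — the regex scan stops at end of input). -/
def pvLineSplit : List Char → List Char × Option (List Char)
  | [] => ([], none)
  | c :: rest =>
    if c = '\n' then ([], some rest)
    else ((c :: (pvLineSplit rest).1), (pvLineSplit rest).2)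

/-- The capture group of '^LD (.*)' at one line start: [] when the anchor match fails. -/
def pvCapture : List Char → List Char
  | 'L' :: 'D' :: ' ' :: t => t
  | _ => []

theorem pvLineSplit_some_length {cs rest : List Char} {line : List Char}
    (h : pvLineSplit cs = (line, some rest)) : rest.length < cs.length := by
  induction cs generalizing line with
  | nil => simp [pvLineSplit] at h
  | cons c cs ih =>
    simp only [pvLineSplit] at h
    split_ifs at h with hc
    · cases h; simp
    · have h2 : (pvLineSplit cs).2 = some rest := congrArg Prod.snd h
      have h3 : pvLineSplit cs = ((pvLineSplit cs).1, some rest) := by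
        rw [← h2]
      exact Nat.lt_succ_of_lt (ih h3)

/-- The multiline scan: capture at this line start, then continue after the '\n'. -/
def pvScanLD (cs : List Char) : List Char :=
  match hsp : pvLineSplit cs with
  | (line, none) => pvCapture line
  | (line, some rest) => pvCapture line ++ pvScanLD rest
termination_by cs.length
decreasing_by exact pvLineSplit_some_length hsp

def ladder_logic_to_hex_alt (ladder_logic : String) : String :=
  String.ofList (pvScanLD ladder_logic.toList)

-- ===== PRECONDITION & SPEC =====
def Spec_ladder_logic_to_hex (ladder_logic : String) (out : String) : Prop := out = ladder_logic_to_hex_alt ladder_logic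
instance (ladder_logic : String) (out : String) : Decidable (Spec_ladder_logic_to_hex ladder_logic out) := by unfold Spec_ladder_logic_to_hex; infer_instance

-- ===== CLAIM (what is proved, stated in full; the proofs are below) =====
def Claim_equal_ladder_logic_to_hex : Prop := ∀ (ladder_logic : String), Dom_ladder_logic_to_hex ladder_logic → Spec_ladder_logic_to_hex ladder_logic (ladder_logic_to_hex ladder_logic)

-- ===== LEMMAS AND PROOFS =====

/-- Recursive characterisation of split-on-'\n'. -/
def pvNlSplit : List Char → List (List Char)
  | [] => [[]]
  | c :: rest =>
    if c = '\n' then [] :: pvNlSplit rest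
    else
      match pvNlSplit rest with
      | [] => [[c]]
      | p :: ps => (c :: p) :: ps

theorem pvNlSplit_ne_nil (cs : List Char) : pvNlSplit cs ≠ [] := by
  induction cs with
  | nil => simp [pvNlSplit]
  | cons c rest ih =>
    simp only [pvNlSplit]
    split_ifs
    · simp
    · cases h : pvNlSplit rest <;> simp

theorem pvSplitOn_go_spec (fuel : Nat) (cs cur : List Char) (acc : List (List Char))
    (h : cs.length ≤ fuel) :
    PySem.Chars.splitOn.go ['\n'] fuel cs cur acc =
      acc.reverse ++
        (match pvNlSplit cs with
         | [] => []
         | p :: ps => (cur.reverse ++ p) :: ps) := by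
  induction fuel generalizing cs cur acc with
  | zero =>
    have : cs = [] := List.length_eq_zero_iff.mp (Nat.le_zero.mp h)
    subst this
    simp [PySem.Chars.splitOn.go, pvNlSplit]
  | succ fuel ih =>
    cases cs with
    | nil => simp [PySem.Chars.splitOn.go, pvNlSplit]
    | cons c rest =>
      simp only [PySem.Chars.splitOn.go]
      by_cases hc : c = '\n'
      · subst hc
        rw [if_pos (by simp [List.isPrefixOf])]
        have hd : List.drop (['\n'] : List Char).length ('\n' :: rest) = rest := rfl
        rw [hd, ih rest [] (List.reverse cur :: acc) (by simpa using Nat.le_of_succ_le_succ h)]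
        simp only [pvNlSplit]
        cases hps : pvNlSplit rest with
        | nil => exact absurd hps (pvNlSplit_ne_nil rest)
        | cons p ps => simp
      · rw [if_neg (by simp [List.isPrefixOf]; exact fun hh => hc hh.symm)]
        rw [ih rest (c :: cur) acc (by simpa using Nat.le_of_succ_le_succ h)]
        simp only [pvNlSplit, if_neg hc]
        cases hps : pvNlSplit rest with
        | nil => exact absurd hps (pvNlSplit_ne_nil rest)
        | cons p ps => simp

theorem pvSplitOn_eq_nlSplit (cs : List Char) :
    PySem.Chars.splitOn cs ['\n'] = pvNlSplit cs := by
  have := pvSplitOn_go_spec (cs.length + 1) cs [] [] (Nat.le_succ _)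
  rw [PySem.Chars.splitOn]
  rw [this]
  cases h : pvNlSplit cs with
  | nil => exact absurd h (pvNlSplit_ne_nil cs)
  | cons p ps => simp

/-- The capture is: suffix after 'LD ' when the line starts with it, else empty. -/
theorem pvCapture_eq (line : List Char) :
    pvCapture line =
      if (['L', 'D', ' '] : List Char).isPrefixOf line then List.drop 3 line else [] := by
  simp only [pvCapture.eq_def]
  split
  · rename_i t
    simp [List.isPrefixOf]
  · rename_i hne
    have hnp : ¬ ((['L', 'D', ' '] : List Char).isPrefixOf line = true) := by
      intro hp
      obtain ⟨t, rfl⟩ := List.isPrefixOf_iff_prefix.mp hp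
      exact hne t (by simp)
    simp [hnp]

/-- A's loop body adds exactly the regex capture. -/
theorem pvStep_eq_capture (hex line : List Char) :
    (if PySem.Chars.startswith line ['L', 'D', ' '] then
        hex ++ PySem.Chars.slice line (some 3) none
      else hex) = hex ++ pvCapture line := by
  have hslice : PySem.Chars.slice line (some 3) none = List.drop 3 line := by
    show PySem.List.slice line (some 3) none = _
    rw [show (some (3 : Int)) = some ((3 : Nat) : Int) from rfl,
      PySem.List.slice_from_natCast]
  rw [pvCapture_eq, hslice]
  show (if (['L', 'D', ' '] : List Char).isPrefixOf line = true then _ else _) = _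
  split_ifs with h
  · rfl
  · simp

theorem pvNlSplit_eq_lineSplit (cs : List Char) :
    pvNlSplit cs =
      (pvLineSplit cs).1 ::
        (match (pvLineSplit cs).2 with
         | none => []
         | some rest => pvNlSplit rest) := by
  induction cs with
  | nil => simp [pvNlSplit, pvLineSplit]
  | cons c rest ih =>
    simp only [pvNlSplit, pvLineSplit]
    by_cases hc : c = '\n'
    · simp [hc]
    · rw [if_neg hc, if_neg hc, ih]

theorem pvFoldl_eq_scan (cs : List Char) (hex : List Char) :
    (pvNlSplit cs).foldl (fun hex_data line =>
        if PySem.Chars.startswith line ['L', 'D', ' '] then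
          hex_data ++ PySem.Chars.slice line (some 3) none
        else hex_data) hex = hex ++ pvScanLD cs := by
  induction cs using pvScanLD.induct generalizing hex with
  | case1 cs line h =>
    rw [pvNlSplit_eq_lineSplit cs, pvScanLD]
    rw [h]
    simp only [List.foldl]
    rw [pvStep_eq_capture]
  | case2 cs line rest h ih =>
    rw [pvNlSplit_eq_lineSplit cs, pvScanLD]
    rw [h]
    simp only [List.foldl]
    rw [pvStep_eq_capture, ih]
    simp

-- ===== VERDICT (by name: the statement is the Claim_ definition above) =====
theorem ladder_logic_to_hex_spec : Claim_equal_ladder_logic_to_hex := by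
  intro s _
  show _ = _
  unfold ladder_logic_to_hex ladder_logic_to_hex_alt
  simp only [pvSplitOn_eq_nlSplit, pvFoldl_eq_scan, List.nil_append]
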